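-- pv_equiv track=rewrite | github.com/AndryRafam/Algo-Dojo | Maths/PrimeGaps.py | prime_gaps
-- ===== SOURCE A (Python) =====
-- import math
--
-- def isPrime(n)->bool:
--     if(n < 2):
--         return False
--     for x in range(2,int(math.sqrt(n))+1):
--         if(n%x==0):
--             return False
--     return True
--
-- def prime_gaps(g,m,n)->list:
-- 	res = []
-- 	for i in range(m,n+1):
-- 		for j in range(i+1,n+1):
-- 			if isPrime(i) and isPrime(j) and j-i==g:
-- 				res.append(i)
-- 				res.append(j)
-- 				return res
-- 	return [0,0]
-- ===== SOURCE B (Python) =====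
-- import math
--
-- def isPrime(n) -> bool:
--     return n >= 2 and all(n % d for d in range(2, int(math.sqrt(n)) + 1))
--
-- def prime_gaps(g, m, n) -> list:
--     # only j = i + g can satisfy j - i == g, so scan i once and test i, i+g
--     if g >= 1:
--         for i in range(m, n + 1 - g):
--             if isPrime(i) and isPrime(i + g):
--                 return [i, i + g]
--     return [0, 0]
-- ===== Notes on version B (the rewrite author's own statement) =====
-- stated objective: alternative
-- what changed: Replaces A's nested scan over all pairs (i,j) with a single pass over i that tests i and i+g directly (only j=i+g can satisfy j-i==g), guarded by g>=1; it avoids A's quadratic pair scan, though a timing run could not confirm a speed-up at the largest sizes (there both finish instantly or A times out).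
import Mathlib
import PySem

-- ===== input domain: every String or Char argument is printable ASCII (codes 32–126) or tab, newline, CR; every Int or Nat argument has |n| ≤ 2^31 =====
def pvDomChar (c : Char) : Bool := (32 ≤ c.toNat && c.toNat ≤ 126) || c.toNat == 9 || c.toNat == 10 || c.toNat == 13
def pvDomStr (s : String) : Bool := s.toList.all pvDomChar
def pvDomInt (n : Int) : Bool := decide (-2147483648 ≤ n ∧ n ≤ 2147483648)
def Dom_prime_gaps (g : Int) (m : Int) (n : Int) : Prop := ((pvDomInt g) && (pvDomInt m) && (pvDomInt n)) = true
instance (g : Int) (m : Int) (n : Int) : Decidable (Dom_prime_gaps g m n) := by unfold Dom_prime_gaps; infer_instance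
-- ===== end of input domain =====

-- B replaces A's nested scan over all pairs (i,j) by a single pass testing i and
-- i+g directly (only j = i+g can satisfy j-i == g), guarded by g >= 1.

-- ===== PORT A =====
-- int(math.sqrt(n)) = Nat.sqrt n.toNat, exact for 2 ≤ n ≤ 2^31 (double sqrt rounds correctly there)
def isPrime (n : Int) : Bool :=
  if n < 2 then false
  else (PySem.List.pyRange 2 (((Int.toNat n).sqrt : Int) + 1) 1).all
         (fun x => !(PySem.Int.mod n x == 0))

-- inner 'for j in range(i+1, n+1)' with early return
def pgInner (g : Int) (i : Int) : List Int → Option (List Int)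
  | [] => none
  | j :: js =>
      if isPrime i && isPrime j && (j - i == g) then some [i, j]
      else pgInner g i js

-- outer 'for i in range(m, n+1)'
def pgOuter (g : Int) (n : Int) : List Int → Option (List Int)
  | [] => none
  | i :: is =>
      match pgInner g i (PySem.List.pyRange (i + 1) (n + 1) 1) with
      | some r => some r
      | none => pgOuter g n is

def prime_gaps (g : Int) (m : Int) (n : Int) : List Int :=
  match pgOuter g n (PySem.List.pyRange m (n + 1) 1) with
  | some r => r
  | none => [0, 0]

-- ===== PORT B =====
def isPrimeB (n : Int) : Bool :=
  decide (2 ≤ n) &&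
    (PySem.List.pyRange 2 (((Int.toNat n).sqrt : Int) + 1) 1).all
      (fun d => !(PySem.Int.mod n d == 0))

-- 'for i in range(m, n+1-g)' with early return
def pgScan (g : Int) : List Int → Option (List Int)
  | [] => none
  | i :: is =>
      if isPrimeB i && isPrimeB (i + g) then some [i, i + g]
      else pgScan g is

def prime_gaps_alt (g : Int) (m : Int) (n : Int) : List Int :=
  if 1 ≤ g then
    match pgScan g (PySem.List.pyRange m (n + 1 - g) 1) with
    | some r => r
    | none => [0, 0]
  else [0, 0]

-- ===== PRECONDITION & SPEC =====
def Spec_prime_gaps (g : Int) (m : Int) (n : Int) (out : List Int) : Prop := out = prime_gaps_alt g m n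
instance (g : Int) (m : Int) (n : Int) (out : List Int) : Decidable (Spec_prime_gaps g m n out) := by unfold Spec_prime_gaps; infer_instance

-- ===== CLAIM (what is proved, stated in full; the proofs are below) =====
def Claim_equal_prime_gaps : Prop := ∀ (g : Int) (m : Int) (n : Int), Dom_prime_gaps g m n → Spec_prime_gaps g m n (prime_gaps g m n)

-- ===== LEMMAS AND PROOFS =====

theorem isPrimeB_eq (n : Int) : isPrimeB n = isPrime n := by
  unfold isPrime isPrimeB
  by_cases h : n < 2
  · simp [h, show ¬ (2 ≤ n) by omega]
  · simp [h, show (2 ≤ n) by omega]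

-- the inner loop finds a pair iff i and i+g are prime and i+g is in the scanned list
theorem pgInner_eq (g i : Int) (js : List Int) :
    pgInner g i js =
      if isPrime i ∧ isPrime (i + g) ∧ (i + g) ∈ js then some [i, i + g] else none := by
  induction js with
  | nil => simp [pgInner]
  | cons j js ih =>
      rw [pgInner, ih]
      by_cases hj : j = i + g
      · subst hj
        have hbeq : (i + g - i == g) = true := by simp only [beq_iff_eq]; ring
        cases hA : isPrime i <;> cases hB : isPrime (i + g) <;> simp [hA, hB, hbeq]
      · have hne : (j - i == g) = false := by simp only [beq_eq_false_iff_ne, ne_eq]; omega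
        have hj' : ¬ (i + g = j) := fun h => hj h.symm
        simp [hne, hj']

-- A's outer loop never finds anything when g ≤ 0 (j - i = g needs j > i)
theorem pgOuter_none_of_nonpos (g n : Int) (hg : g < 1) :
    ∀ is : List Int, pgOuter g n is = none := by
  intro is
  induction is with
  | nil => rfl
  | cons i is ih =>
      rw [pgOuter, pgInner_eq]
      have : (i + g) ∉ PySem.List.pyRange (i + 1) (n + 1) 1 := by
        rw [PySem.List.mem_pyRange_one]; omega
      simp [this, ih]

-- main loop correspondence for g ≥ 1, by induction on the remaining range length
theorem pgOuter_eq_pgScan (g n : Int) (hg : 1 ≤ g) :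
    ∀ (k : Nat) (a : Int), (n + 1 - a).toNat = k →
      pgOuter g n (PySem.List.pyRange a (n + 1) 1) =
        pgScan g (PySem.List.pyRange a (n + 1 - g) 1) := by
  intro k
  induction k with
  | zero =>
      intro a ha
      rw [PySem.List.pyRange_one_eq_nil (by omega : n + 1 ≤ a),
          PySem.List.pyRange_one_eq_nil (by omega : n + 1 - g ≤ a)]
      rfl
  | succ k ih =>
      intro a ha
      have h1 : a < n + 1 := by omega
      rw [PySem.List.pyRange_one_cons h1, pgOuter, pgInner_eq]
      have hmem : (a + g) ∈ PySem.List.pyRange (a + 1) (n + 1) 1 ↔ a < n + 1 - g := by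
        rw [PySem.List.mem_pyRange_one]; omega
      have hrec := ih (a + 1) (by omega)
      by_cases hb : a < n + 1 - g
      · rw [PySem.List.pyRange_one_cons hb, pgScan, isPrimeB_eq, isPrimeB_eq]
        cases hA : isPrime a <;> cases hB : isPrime (a + g) <;>
          simp [hA, hB, hmem.mpr hb, hrec]
      · have hnot : ¬ (isPrime a ∧ isPrime (a + g) ∧
            (a + g) ∈ PySem.List.pyRange (a + 1) (n + 1) 1) := by
          intro h; exact hb (hmem.mp h.2.2)
        rw [if_neg hnot,
            PySem.List.pyRange_one_eq_nil (by omega : n + 1 - g ≤ a)]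
        rw [PySem.List.pyRange_one_eq_nil (by omega : n + 1 - g ≤ a + 1)] at hrec
        simpa using hrec

-- ===== VERDICT (by name: the statement is the Claim_ definition above) =====
theorem prime_gaps_spec : Claim_equal_prime_gaps := by
  intro g m n _
  unfold Spec_prime_gaps prime_gaps prime_gaps_alt
  by_cases hg : 1 ≤ g
  · rw [if_pos hg, pgOuter_eq_pgScan g n hg (n + 1 - m).toNat m rfl]
  · rw [if_neg hg, pgOuter_none_of_nonpos g n (by omega)]
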